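-- pv_equiv track=rewrite | github.com/GeoMG77/Decode-Ways-Genetic | src/P_Dinamica/P_dinamica.py | generar_variantes_dinamica
-- ===== SOURCE A (Python) =====
-- import itertools
--
-- IUPAC_DNA = {
--     'A': 'A', 'C': 'C', 'G': 'G', 'T': 'T',
--     'R': 'AG', 'Y': 'CT', 'S': 'GC', 'W': 'AT',
--     'K': 'GT', 'M': 'AC', 'B': 'CGT', 'D': 'AGT',
--     'H': 'ACT', 'V': 'ACG', 'N': 'ACGT'
-- }
--
-- TABLA_CODONES = {
--     'ATA':'I', 'ATC':'I', 'ATT':'I', 'ATG':'M',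
--     'ACA':'T', 'ACC':'T', 'ACG':'T', 'ACT':'T',
--     'AAC':'N', 'AAT':'N', 'AAA':'K', 'AAG':'K',
--     'AGC':'S', 'AGT':'S', 'AGA':'R', 'AGG':'R',
--     'CTA':'L', 'CTC':'L', 'CTG':'L', 'CTT':'L',
--     'CCA':'P', 'CCC':'P', 'CCG':'P', 'CCT':'P',
--     'CAC':'H', 'CAT':'H', 'CAA':'Q', 'CAG':'Q',
--     'CGA':'R', 'CGC':'R', 'CGG':'R', 'CGT':'R',
--     'GTA':'V', 'GTC':'V', 'GTG':'V', 'GTT':'V',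
--     'GCA':'A', 'GCC':'A', 'GCG':'A', 'GCT':'A',
--     'GAC':'D', 'GAT':'D', 'GAA':'E', 'GAG':'E',
--     'GGA':'G', 'GGC':'G', 'GGG':'G', 'GGT':'G',
--     'TCA':'S', 'TCC':'S', 'TCG':'S', 'TCT':'S',
--     'TTC':'F', 'TTT':'F', 'TTA':'L', 'TTG':'L',
--     'TAC':'Y', 'TAT':'Y', 'TAA':'_', 'TAG':'_',
--     'TGC':'C', 'TGT':'C', 'TGA':'_', 'TGG':'W',
-- }
--
-- def generar_variantes_dinamica(secuencia, limite_seguridad=500000):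
--     #Construcción iterativa (enfoque dinámico) que mantiene una lista de variantes acumuladas (adn_acumulado, prot_acumulado)
--     #y la va expandiendo codón por codón, si la lista intermedia supera  el limite_seguridad, devuelve lo acumulado y True.
--     variantes_actuales = [("", "")]
--     longitud = len(secuencia)
--
--     for i in range(0, longitud, 3):
--         triplete = secuencia[i:i+3]
--         # Generamos todas las combinaciones de ese codón según IUPAC
--         opciones_bases = [list(IUPAC_DNA[b]) for b in triplete]
--         codones_generados = []
--         for comb in itertools.product(*opciones_bases):
--             codon = "".join(comb)
--             aa = TABLA_CODONES.get(codon, "?")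
--             if aa == "_":
--                 aa = ""
--             codones_generados.append((codon, aa))
--
--         nuevas_variantes = []
--         for adn_prev, prot_prev in variantes_actuales:
--             for adn_nuevo, prot_nuevo in codones_generados:
--                 if len(nuevas_variantes) >= limite_seguridad:
--                     return nuevas_variantes, True
--                 nuevas_variantes.append((adn_prev + adn_nuevo, prot_prev + prot_nuevo))
--
--         variantes_actuales = nuevas_variantes
--
--     return variantes_actuales, False
-- ===== SOURCE B (Python) =====
-- import itertools
--
-- _AA64 = "FFLLSSSSYY__CC_WLLLLPPPPHHQQRRRRIIIMTTTTNNKKSSRRVVVVAAAADDEEGGGG"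
-- _BASES = "TCAG"
-- _IUPAC_CODES = "ACGTRYSWKMBDHVN"
-- _IUPAC_SETS = ["A", "C", "G", "T", "AG", "CT", "GC", "AT",
--                "GT", "AC", "CGT", "AGT", "ACT", "ACG", "ACGT"]
--
-- def _aminoacido(codon):
--     # 64-entry translation string indexed by base-4 TCAG encoding; '?' for partial codons
--     if len(codon) != 3:
--         return "?"
--     idx = 16 * _BASES.index(codon[0]) + 4 * _BASES.index(codon[1]) + _BASES.index(codon[2])
--     aa = _AA64[idx]
--     return "" if aa == "_" else aa
--
-- def _expandir(triplete):
--     # depth-first recursive expansion of one IUPAC triplet into concrete codon strings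
--     if not triplete:
--         return [""]
--     resto = _expandir(triplete[1:])
--     bases = _IUPAC_SETS[_IUPAC_CODES.index(triplete[0])]
--     return [b + r for b in bases for r in resto]
--
-- def generar_variantes_dinamica(secuencia, limite_seguridad=500000):
--     opts = [[(codon, _aminoacido(codon)) for codon in _expandir(secuencia[i:i + 3])]
--             for i in range(0, len(secuencia), 3)]
--     # first codon layer at which the cumulative variant count strictly exceeds the limit
--     prod = 1
--     desborde = None
--     for idx, pares in enumerate(opts):
--         prod *= len(pares)
--         if prod > limite_seguridad:
--             desborde = idx
--             break
--     if desborde is None: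
--         sels = itertools.product(*opts)
--     else:
--         sels = itertools.islice(itertools.product(*opts[:desborde + 1]),
--                                 max(limite_seguridad, 0))
--     variantes = [("".join(p[0] for p in sel), "".join(p[1] for p in sel)) for sel in sels]
--     return variantes, desborde is not None
-- ===== Notes on version B (the rewrite author's own statement) =====
-- stated objective: alternative
-- what changed: B drops A's 15-entry/64-entry dict lookups and layer-by-layer accumulator rebuild: it translates each codon by indexing a 64-character translation string via a base-4 TCAG encoding, expands each IUPAC triplet by a depth-first recursion, locates the first overflowing layer with a cumulative product of option counts, and materialises the result in one truncated itertools.product pass.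
-- outside the precondition, e.g. on generar_variantes_dinamica('MRSLST', 1): A returns ([('AAG', 'K')], True), B raises ValueError
import Mathlib
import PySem

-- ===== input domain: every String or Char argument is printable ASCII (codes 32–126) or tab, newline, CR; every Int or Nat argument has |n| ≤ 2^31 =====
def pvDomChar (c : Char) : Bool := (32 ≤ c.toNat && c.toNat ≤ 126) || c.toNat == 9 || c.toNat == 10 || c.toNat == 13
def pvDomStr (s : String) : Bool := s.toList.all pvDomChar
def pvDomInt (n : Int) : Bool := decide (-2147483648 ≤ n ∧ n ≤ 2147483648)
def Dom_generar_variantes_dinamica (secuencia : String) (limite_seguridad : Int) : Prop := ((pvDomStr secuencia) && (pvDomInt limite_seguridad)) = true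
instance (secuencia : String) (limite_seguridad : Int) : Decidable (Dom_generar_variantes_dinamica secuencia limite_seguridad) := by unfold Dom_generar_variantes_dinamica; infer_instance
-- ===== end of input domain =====

-- B replaces A's dict lookups and layer-by-layer accumulator rebuild (with an in-loop early
-- return) by a 64-character translation string indexed by a base-4 TCAG codon encoding, a
-- depth-first recursive IUPAC expansion, a cumulative-product overflow search and one
-- truncated cartesian product; equivalence of the RETURN value is proved on Pre_ (pure IUPAC
-- sequences, where the Python A returns instead of raising KeyError).

abbrev PairCL : Type := List Char × List Char

-- ===== PORT A =====
-- module-level tables IUPAC_DNA and TABLA_CODONES as used by A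
def iupac (c : Char) : List Char :=
  match c with
  | 'A' => ['A'] | 'C' => ['C'] | 'G' => ['G'] | 'T' => ['T']
  | 'R' => ['A','G'] | 'Y' => ['C','T'] | 'S' => ['G','C'] | 'W' => ['A','T']
  | 'K' => ['G','T'] | 'M' => ['A','C'] | 'B' => ['C','G','T'] | 'D' => ['A','G','T']
  | 'H' => ['A','C','T'] | 'V' => ['A','C','G'] | 'N' => ['A','C','G','T']
  | _ => []      -- KeyError in Python: excluded by Pre_

def tabla (codon : List Char) : List Char :=
  match codon with
  | ['A','T','A'] => ['I'] | ['A','T','C'] => ['I'] | ['A','T','T'] => ['I'] | ['A','T','G'] => ['M']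
  | ['A','C','A'] => ['T'] | ['A','C','C'] => ['T'] | ['A','C','G'] => ['T'] | ['A','C','T'] => ['T']
  | ['A','A','C'] => ['N'] | ['A','A','T'] => ['N'] | ['A','A','A'] => ['K'] | ['A','A','G'] => ['K']
  | ['A','G','C'] => ['S'] | ['A','G','T'] => ['S'] | ['A','G','A'] => ['R'] | ['A','G','G'] => ['R']
  | ['C','T','A'] => ['L'] | ['C','T','C'] => ['L'] | ['C','T','G'] => ['L'] | ['C','T','T'] => ['L']
  | ['C','C','A'] => ['P'] | ['C','C','C'] => ['P'] | ['C','C','G'] => ['P'] | ['C','C','T'] => ['P']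
  | ['C','A','C'] => ['H'] | ['C','A','T'] => ['H'] | ['C','A','A'] => ['Q'] | ['C','A','G'] => ['Q']
  | ['C','G','A'] => ['R'] | ['C','G','C'] => ['R'] | ['C','G','G'] => ['R'] | ['C','G','T'] => ['R']
  | ['G','T','A'] => ['V'] | ['G','T','C'] => ['V'] | ['G','T','G'] => ['V'] | ['G','T','T'] => ['V']
  | ['G','C','A'] => ['A'] | ['G','C','C'] => ['A'] | ['G','C','G'] => ['A'] | ['G','C','T'] => ['A']
  | ['G','A','C'] => ['D'] | ['G','A','T'] => ['D'] | ['G','A','A'] => ['E'] | ['G','A','G'] => ['E']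
  | ['G','G','A'] => ['G'] | ['G','G','C'] => ['G'] | ['G','G','G'] => ['G'] | ['G','G','T'] => ['G']
  | ['T','C','A'] => ['S'] | ['T','C','C'] => ['S'] | ['T','C','G'] => ['S'] | ['T','C','T'] => ['S']
  | ['T','T','C'] => ['F'] | ['T','T','T'] => ['F'] | ['T','T','A'] => ['L'] | ['T','T','G'] => ['L']
  | ['T','A','C'] => ['Y'] | ['T','A','T'] => ['Y'] | ['T','A','A'] => ['_'] | ['T','A','G'] => ['_']
  | ['T','G','C'] => ['C'] | ['T','G','T'] => ['C'] | ['T','G','A'] => ['_'] | ['T','G','G'] => ['W']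
  | _ => ['?']

-- itertools.product(*lists), in Python's order
def pyProduct {α : Type} : List (List α) → List (List α)
  | [] => [[]]
  | l :: ls => l.flatMap (fun a => (pyProduct ls).map (fun r => a :: r))

-- A's inner construction of codones_generados for one triplet
def mkCodones (triplete : List Char) : List PairCL :=
  (pyProduct (triplete.map iupac)).map (fun codon =>
    let aa := tabla codon
    (codon, if aa = ['_'] then [] else aa))

def innerCodon (lim : Int) (prev : PairCL) : List PairCL → List PairCL → Sum (List PairCL) (List PairCL)
  | acc, [] => .inl acc
  | acc, c :: cs =>
    if lim ≤ (acc.length : Int) then .inr acc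
    else innerCodon lim prev (acc ++ [(prev.1 ++ c.1, prev.2 ++ c.2)]) cs

def innerVars (lim : Int) (cod : List PairCL) : List PairCL → List PairCL → Sum (List PairCL) (List PairCL)
  | acc, [] => .inl acc
  | acc, p :: vs =>
    match innerCodon lim p acc cod with
    | .inl acc' => innerVars lim cod acc' vs
    | .inr r => .inr r

def outerA (sec : List Char) (lim : Int) : List Int → List PairCL → List PairCL × Bool
  | [], vs => (vs, false)
  | i :: rest, vs =>
    match innerVars lim (mkCodones (PySem.List.slice sec (some i) (some (i + 3)))) [] vs with
    | .inl nv => outerA sec lim rest nv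
    | .inr r => (r, true)

def generar_variantes_dinamica (secuencia : String) (limite_seguridad : Int) : (List (String × String)) × Bool :=
  let sec := secuencia.toList
  let r := outerA sec limite_seguridad (PySem.List.pyRange 0 (sec.length : Int) 3) [([], [])]
  (r.1.map (fun p => (String.ofList p.1, String.ofList p.2)), r.2)

-- ===== PORT B =====
-- _AA64, _BASES, _IUPAC_CODES, _IUPAC_SETS of Source B
def aa64 : List Char :=
  ['F','F','L','L','S','S','S','S','Y','Y','_','_','C','C','_','W',
   'L','L','L','L','P','P','P','P','H','H','Q','Q','R','R','R','R',
   'I','I','I','M','T','T','T','T','N','N','K','K','S','S','R','R',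
   'V','V','V','V','A','A','A','A','D','D','E','E','G','G','G','G']
def tcag : List Char := ['T','C','A','G']
def iupacCodes : List Char := ['A','C','G','T','R','Y','S','W','K','M','B','D','H','V','N']
def iupacSets : List (List Char) :=
  [['A'], ['C'], ['G'], ['T'], ['A','G'], ['C','T'], ['G','C'], ['A','T'], ['G','T'],
   ['A','C'], ['C','G','T'], ['A','G','T'], ['A','C','T'], ['A','C','G'], ['A','C','G','T']]

-- str.index: under Pre_ the looked-up char is always present, so the getD default is dead code
def tcagIdx (c : Char) : Nat := (PySem.List.index? tcag c).getD 0

-- Source B's _aminoacido: translate by indexing the 64-char string (index always < 64, so getD is exact)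
def aminoacido (codon : List Char) : List Char :=
  match codon with
  | [a, b, c] =>
    let aa := aa64.getD (16 * tcagIdx a + 4 * tcagIdx b + tcagIdx c) '?'
    if aa = '_' then [] else [aa]
  | _ => ['?']

-- _IUPAC_SETS[_IUPAC_CODES.index(c)] (ValueError off the IUPAC alphabet: excluded by Pre_)
def basesDe (c : Char) : List Char :=
  iupacSets.getD ((PySem.List.index? iupacCodes c).getD 0) []

-- Source B's _expandir: depth-first recursion over the triplet
def expandir : List Char → List (List Char)
  | [] => [[]]
  | c :: rest =>
    let resto := expandir rest
    (basesDe c).flatMap (fun b => resto.map (fun r => b :: r))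

def opcionesDe (triplete : List Char) : List PairCL :=
  (expandir triplete).map (fun codon => (codon, aminoacido codon))

-- the cumulative-product overflow search of Source B
def findOverflow (lim : Int) : Int → List Int → Option Nat
  | _, [] => none
  | prod, c :: cs =>
    if lim < prod * c then some 0
    else (findOverflow lim (prod * c) cs).map (fun j => j + 1)

def joinSel (sel : List PairCL) : String × String :=
  (String.ofList (sel.map Prod.fst).flatten, String.ofList (sel.map Prod.snd).flatten)

def generar_variantes_dinamica_alt (secuencia : String) (limite_seguridad : Int) : (List (String × String)) × Bool :=
  let sec := secuencia.toList
  let opts := (PySem.List.pyRange 0 (sec.length : Int) 3).map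
      (fun i => opcionesDe (PySem.List.slice sec (some i) (some (i + 3))))
  match findOverflow limite_seguridad 1 (opts.map (fun o => (o.length : Int))) with
  | none => ((pyProduct opts).map joinSel, false)
  | some j => (((pyProduct (opts.take (j + 1))).take limite_seguridad.toNat).map joinSel, true)

-- ===== PRECONDITION & SPEC =====
-- Pre_ excludes sequences containing a non-IUPAC character: the Python A usually raises KeyError there,
-- and where it instead returns (the limit overflows before the invalid codon is reached) B itself raises ValueError.
def Pre_generar_variantes_dinamica (secuencia : String) (limite_seguridad : Int) : Prop :=
  secuencia.toList.all
    (fun c => ['A','C','G','T','R','Y','S','W','K','M','B','D','H','V','N'].contains c) = true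
instance (secuencia : String) (limite_seguridad : Int) : Decidable (Pre_generar_variantes_dinamica secuencia limite_seguridad) := by unfold Pre_generar_variantes_dinamica; infer_instance

def pvWitness_generar_variantes_dinamica : String × Int := ("RAT", 10)

def Spec_generar_variantes_dinamica (secuencia : String) (limite_seguridad : Int) (out : (List (String × String)) × Bool) : Prop := out = generar_variantes_dinamica_alt secuencia limite_seguridad
instance (secuencia : String) (limite_seguridad : Int) (out : (List (String × String)) × Bool) : Decidable (Spec_generar_variantes_dinamica secuencia limite_seguridad out) := by unfold Spec_generar_variantes_dinamica; infer_instance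

-- ===== CLAIM (what is proved, stated in full; the proofs are below) =====
def Claim_equal_generar_variantes_dinamica : Prop := ∀ (secuencia : String) (limite_seguridad : Int), Dom_generar_variantes_dinamica secuencia limite_seguridad → Pre_generar_variantes_dinamica secuencia limite_seguridad → Spec_generar_variantes_dinamica secuencia limite_seguridad (generar_variantes_dinamica secuencia limite_seguridad)

-- ===== LEMMAS AND PROOFS =====

def combineP (p c : PairCL) : PairCL := (p.1 ++ c.1, p.2 ++ c.2)

def cross (vs o : List PairCL) : List PairCL := vs.flatMap (fun p => o.map (combineP p))

def crossAll : List PairCL → List (List PairCL) → List PairCL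
  | vs, [] => vs
  | vs, o :: os => crossAll (cross vs o) os

def outerCore (lim : Int) : List (List PairCL) → List PairCL → List PairCL × Bool
  | [], vs => (vs, false)
  | o :: os, vs =>
    match innerVars lim o [] vs with
    | .inl nv => outerCore lim os nv
    | .inr r => (r, true)

def joinP (sel : List PairCL) : PairCL := ((sel.map Prod.fst).flatten, (sel.map Prod.snd).flatten)

-- ---- bridging: B's table/recursion agree with A's dict lookups on the IUPAC domain ----

set_option maxRecDepth 4000 in
lemma basesDe_eq : ∀ c ∈ iupacCodes, basesDe c = iupac c := by
  intro c hc
  fin_cases hc <;> decide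

set_option maxRecDepth 4000 in
lemma iupac_sub : ∀ c ∈ iupacCodes, ∀ b ∈ iupac c, b ∈ (['A','C','G','T'] : List Char) := by
  intro c hc
  fin_cases hc <;> intro b hb <;> fin_cases hb <;> decide

lemma expandir_eq (trip : List Char) (h : ∀ c ∈ trip, c ∈ iupacCodes) :
    expandir trip = pyProduct (trip.map iupac) := by
  induction trip with
  | nil => rfl
  | cons c rest ih =>
    rw [expandir, List.map_cons, pyProduct, ih (fun x hx => h x (by simp [hx])),
      basesDe_eq c (h c (by simp))]

lemma mem_pyProduct_chars (trip : List Char) (h : ∀ c ∈ trip, c ∈ iupacCodes) :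
    ∀ codon ∈ pyProduct (trip.map iupac), ∀ ch ∈ codon, ch ∈ (['A','C','G','T'] : List Char) := by
  induction trip with
  | nil =>
    intro codon hc ch hch
    simp [pyProduct] at hc
    subst hc
    simp at hch
  | cons c rest ih =>
    intro codon hc ch hch
    rw [List.map_cons, pyProduct] at hc
    rcases List.mem_flatMap.1 hc with ⟨a, ha, hmem⟩
    rcases List.mem_map.1 hmem with ⟨r, hr, rfl⟩
    rcases List.mem_cons.1 hch with h1 | h2
    · subst h1; exact iupac_sub c (h c (by simp)) ch ha
    · exact ih (fun x hx => h x (by simp [hx])) r hr ch h2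

set_option maxRecDepth 4000 in
lemma aa_eq : ∀ codon : List Char, (∀ ch ∈ codon, ch ∈ (['A','C','G','T'] : List Char)) →
    codon.length ≤ 3 →
    aminoacido codon = (if tabla codon = ['_'] then [] else tabla codon) := by
  intro codon h hlen
  match codon with
  | [] => decide
  | [a] =>
    have ha := h a (by simp)
    fin_cases ha <;> decide
  | [a, b] =>
    have ha := h a (by simp)
    have hb := h b (by simp)
    fin_cases ha <;> fin_cases hb <;> decide
  | [a, b, c] =>
    have ha := h a (by simp)
    have hb := h b (by simp)
    have hc := h c (by simp)
    fin_cases ha <;> fin_cases hb <;> fin_cases hc <;> decide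
  | _ :: _ :: _ :: _ :: _ => simp at hlen; omega

lemma length_mem_pyProduct {α : Type} : ∀ (ls : List (List α)) (x : List α),
    x ∈ pyProduct ls → x.length = ls.length := by
  intro ls
  induction ls with
  | nil => intro x hx; simp [pyProduct] at hx; simp [hx]
  | cons l ls ih =>
    intro x hx
    rw [pyProduct] at hx
    rcases List.mem_flatMap.1 hx with ⟨a, _, hmem⟩
    rcases List.mem_map.1 hmem with ⟨r, hr, rfl⟩
    simp [ih r hr]

lemma slice3_len (sec : List Char) (i : Int) (hi : 0 ≤ i) :
    (PySem.List.slice sec (some i) (some (i + 3))).length ≤ 3 := by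
  obtain ⟨n, rfl⟩ := Int.eq_ofNat_of_zero_le hi
  have h3 : ((n : Int) + 3) = ((n + 3 : Nat) : Int) := by push_cast; ring
  rw [h3, PySem.List.slice_natCast]
  have := List.length_take_le (n + 3 - n) (sec.drop n)
  omega

lemma opciones_eq (trip : List Char) (h : ∀ c ∈ trip, c ∈ iupacCodes) (hlen : trip.length ≤ 3) :
    opcionesDe trip = mkCodones trip := by
  rw [opcionesDe, mkCodones, expandir_eq trip h]
  apply List.map_congr_left
  intro codon hc
  have hchars := mem_pyProduct_chars trip h codon hc
  have hl : codon.length ≤ 3 := by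
    have := length_mem_pyProduct (trip.map iupac) codon hc
    simp at this
    omega
  rw [aa_eq codon hchars hl]

-- ---- A's nested loops characterised ----

lemma innerCodon_spec (lim : Int) (prev : PairCL) :
    ∀ (cs acc : List PairCL), (acc.length : Int) ≤ lim →
    innerCodon lim prev acc cs =
      if ((acc.length : Int) + cs.length ≤ lim) then .inl (acc ++ cs.map (combineP prev))
      else .inr (acc ++ (cs.map (combineP prev)).take (lim - acc.length).toNat) := by
  intro cs
  induction cs with
  | nil => intro acc h; simp [innerCodon, h]
  | cons c cs ih =>
    intro acc h
    rw [innerCodon]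
    by_cases hge : lim ≤ (acc.length : Int)
    · have hlen : (acc.length : Int) = lim := le_antisymm h hge
      have hcond : ¬ ((acc.length : Int) + ((c :: cs).length : Nat) ≤ lim) := by simp only [List.length_cons]; push_cast; omega
      rw [if_pos hge, if_neg hcond]
      simp [hlen]
    · have h1 : ((acc ++ [(prev.1 ++ c.1, prev.2 ++ c.2)]).length : Int) ≤ lim := by
        simp; omega
      rw [if_neg hge, ih _ h1]
      have hL : ((acc ++ [(prev.1 ++ c.1, prev.2 ++ c.2)]).length : Int) = (acc.length : Int) + 1 := by simp
      have hcs : (((c :: cs).length : Nat) : Int) = (cs.length : Int) + 1 := by simp only [List.length_cons]; push_cast; ring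
      rw [hL, hcs]
      by_cases hc : (acc.length : Int) + 1 + cs.length ≤ lim
      · have hc2 : ((acc.length : Int) + ((cs.length : Int) + 1) ≤ lim) := by omega
        rw [if_pos hc, if_pos hc2]
        simp [combineP, List.append_assoc]
      · have hc2 : ¬ ((acc.length : Int) + ((cs.length : Int) + 1) ≤ lim) := by omega
        rw [if_neg hc, if_neg hc2]
        have hk : (lim - (acc.length : Int)).toNat = (lim - ((acc.length : Int) + 1)).toNat + 1 := by omega
        simp only [List.map_cons, hk, List.take_succ_cons, combineP]
        simp [List.append_assoc]

lemma innerVars_spec (lim : Int) (cod : List PairCL) :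
    ∀ (vs acc : List PairCL), (acc.length : Int) ≤ lim →
    innerVars lim cod acc vs =
      if ((acc.length : Int) + vs.length * cod.length ≤ lim) then .inl (acc ++ cross vs cod)
      else .inr (acc ++ (cross vs cod).take (lim - acc.length).toNat) := by
  intro vs
  induction vs with
  | nil => intro acc h; simp [innerVars, cross, h]
  | cons p vs ih =>
    intro acc h
    rw [innerVars, innerCodon_spec lim p cod acc h]
    have hcross : cross (p :: vs) cod = cod.map (combineP p) ++ cross vs cod := by
      simp [cross]
    by_cases h1 : (acc.length : Int) + cod.length ≤ lim
    · rw [if_pos h1]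
      show innerVars lim cod (acc ++ cod.map (combineP p)) vs = _
      have hacc2 : (((acc ++ cod.map (combineP p)).length : Nat) : Int) ≤ lim := by
        simp only [List.length_append, List.length_map]; push_cast; omega
      rw [ih _ hacc2]
      have hre : ((acc.length : Int) + ((p :: vs).length : Nat) * cod.length)
          = (((acc ++ cod.map (combineP p)).length : Nat) : Int) + (vs.length : Nat) * cod.length := by
        simp only [List.length_append, List.length_map, List.length_cons]; push_cast; ring
      rw [hre]
      by_cases hc : (((acc ++ cod.map (combineP p)).length : Nat) : Int) + (vs.length : Nat) * cod.length ≤ lim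
      · rw [if_pos hc, if_pos hc]
        simp [hcross, List.append_assoc]
      · rw [if_neg hc, if_neg hc]
        have hlen' : (acc ++ cod.map (combineP p)).length = acc.length + cod.length := by
          simp
        have hn : (lim - (acc.length : Int)).toNat = cod.length + (lim - (((acc ++ cod.map (combineP p)).length : Nat) : Int)).toNat := by
          rw [hlen']; push_cast; omega
        rw [hcross, hn, List.take_append]
        have : (cod.map (combineP p)).length ≤ cod.length + (lim - (((acc ++ cod.map (combineP p)).length : Nat) : Int)).toNat := by
          simp
        rw [List.take_of_length_le this]
        simp [List.append_assoc]
    · rw [if_neg h1]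
      show Sum.inr (acc ++ (cod.map (combineP p)).take (lim - (acc.length : Int)).toNat) = _
      have hcl : (cod.length : Int) ≤ ((p :: vs).length : Nat) * cod.length := by
        have : cod.length ≤ (p :: vs).length * cod.length :=
          Nat.le_mul_of_pos_left _ (by simp)
        exact_mod_cast this
      have hc2 : ¬ ((acc.length : Int) + ((p :: vs).length : Nat) * cod.length ≤ lim) := by
        push_cast at hcl ⊢
        linarith
      rw [if_neg hc2, hcross, List.take_append]
      have hn0 : (lim - (acc.length : Int)).toNat - (cod.map (combineP p)).length = 0 := by
        simp only [List.length_map]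
        omega
      rw [hn0]
      simp

lemma innerVars_neg (lim : Int) (cod vs : List PairCL) (hl : lim < 0)
    (ho : cod ≠ []) (hv : vs ≠ []) : innerVars lim cod [] vs = .inr [] := by
  match vs, hv with
  | p :: vs, _ =>
    match cod, ho with
    | c :: cs, _ =>
      rw [innerVars, innerCodon]
      simp only [List.length_nil, Nat.cast_zero]
      rw [if_pos (by omega)]

lemma cross_ne_nil (vs o : List PairCL) (hv : vs ≠ []) (ho : o ≠ []) : cross vs o ≠ [] := by
  match vs, hv, o, ho with
  | p :: vs, _, c :: cs, _ => simp [cross]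

lemma length_cross (vs o : List PairCL) : (cross vs o).length = vs.length * o.length := by
  induction vs with
  | nil => simp [cross]
  | cons p vs ih =>
    simp only [cross, List.flatMap_cons, List.length_append, List.length_map, List.length_cons] at *
    rw [ih]
    ring

lemma core_spec (lim : Int) :
    ∀ (opts : List (List PairCL)) (vs : List PairCL), (∀ o ∈ opts, o ≠ []) → vs ≠ [] →
    outerCore lim opts vs =
      match findOverflow lim (vs.length : Int) (opts.map (fun o => (o.length : Int))) with
      | none => (crossAll vs opts, false)
      | some j => ((crossAll vs (opts.take (j + 1))).take lim.toNat, true) := by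
  intro opts
  induction opts with
  | nil => intro vs _ _; simp [outerCore, findOverflow, crossAll]
  | cons o os ih =>
    intro vs h hv
    have ho : o ≠ [] := h o (by simp)
    have hos : ∀ x ∈ os, x ≠ [] := fun x hx => h x (by simp [hx])
    have hpos : 1 ≤ vs.length * o.length := by
      rcases List.exists_mem_of_ne_nil vs hv with ⟨p, hp⟩
      rcases List.exists_mem_of_ne_nil o ho with ⟨c, hc⟩
      have := List.length_pos_of_mem hp
      have := List.length_pos_of_mem hc
      exact Nat.one_le_iff_ne_zero.2 (by positivity)
    rw [outerCore, List.map_cons, findOverflow]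
    by_cases hlay : (vs.length : Int) * (o.length : Int) ≤ lim
    · have h0 : (0:Int) ≤ lim := by
        have : (1:Int) ≤ (vs.length : Int) * (o.length : Int) := by exact_mod_cast hpos
        linarith
      rw [innerVars_spec lim o vs [] (by simpa using h0)]
      have hcnd : ((([] : List PairCL).length : Int) + (vs.length : Nat) * o.length ≤ lim) := by
        simpa using hlay
      rw [if_pos hcnd]
      show outerCore lim os (cross vs o) = _
      rw [ih (cross vs o) hos (cross_ne_nil vs o hv ho)]
      rw [if_neg (by omega)]
      have hpc : (vs.length : Int) * (o.length : Int) = ((cross vs o).length : Int) := by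
        rw [length_cross]; push_cast; ring
      rw [hpc]
      cases hf : findOverflow lim ((cross vs o).length : Int) (os.map fun x => (x.length : Int)) with
      | none => simp [crossAll]
      | some j => simp [crossAll]
    · have hlt : lim < (vs.length : Int) * (o.length : Int) := by omega
      rw [if_pos hlt]
      by_cases h0 : (0:Int) ≤ lim
      · rw [innerVars_spec lim o vs [] (by simpa using h0)]
        have hcnd : ¬ ((([] : List PairCL).length : Int) + (vs.length : Nat) * o.length ≤ lim) := by
          simpa using hlay
        rw [if_neg hcnd]
        show (([] : List PairCL) ++ (cross vs o).take (lim - (([] : List PairCL).length : Int)).toNat, true) = _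
        simp [crossAll]
      · rw [innerVars_neg lim o vs (by omega) ho hv]
        show (([] : List PairCL), true) = _
        have hz : lim.toNat = 0 := by omega
        simp [crossAll, hz]

lemma outerA_eq (sec : List Char) (lim : Int) :
    ∀ (idxs : List Int) (vs : List PairCL),
    outerA sec lim idxs vs =
      outerCore lim (idxs.map (fun i => mkCodones (PySem.List.slice sec (some i) (some (i + 3))))) vs := by
  intro idxs
  induction idxs with
  | nil => intro vs; rfl
  | cons i rest ih =>
    intro vs
    rw [outerA, List.map_cons, outerCore]
    cases innerVars lim (mkCodones (PySem.List.slice sec (some i) (some (i + 3)))) [] vs with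
    | inl nv => exact ih nv
    | inr r => rfl

lemma combineP_assoc (p c r : PairCL) : combineP (combineP p c) r = combineP p (combineP c r) := by
  simp [combineP, List.append_assoc]

lemma combineP_assoc' (p c : PairCL) :
    combineP (combineP p c) = fun r => combineP p (combineP c r) := by
  funext r
  exact combineP_assoc p c r

lemma cross_assoc (u v w : List PairCL) : cross (cross u v) w = cross u (cross v w) := by
  simp [cross, List.flatMap_assoc, List.flatMap_map, List.map_flatMap, List.map_map,
    Function.comp_def, combineP_assoc']

lemma cross_single (l : List PairCL) : cross [([], [])] l = l := by
  have h : combineP ([], []) = id := by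
    funext p
    simp [combineP]
  simp [cross, h]

lemma prodJoin_cons (o : List PairCL) (os : List (List PairCL)) :
    (pyProduct (o :: os)).map joinP = cross o ((pyProduct os).map joinP) := by
  simp [pyProduct, cross, List.map_flatMap, List.map_map, Function.comp_def, joinP, combineP]

lemma crossAll_eq (opts : List (List PairCL)) :
    ∀ vs, crossAll vs opts = cross vs ((pyProduct opts).map joinP) := by
  induction opts with
  | nil =>
    intro vs
    simp [crossAll, pyProduct, joinP, cross, combineP]
  | cons o os ih =>
    intro vs
    rw [crossAll, ih, prodJoin_cons, ← cross_assoc]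

lemma prodJoin (opts : List (List PairCL)) :
    (pyProduct opts).map joinP = crossAll [([], [])] opts := by
  rw [crossAll_eq]
  exact (cross_single _).symm

lemma pyProduct_ne_nil {α : Type} (ls : List (List α)) (h : ∀ l ∈ ls, l ≠ []) :
    pyProduct ls ≠ [] := by
  induction ls with
  | nil => simp [pyProduct]
  | cons l ls ih =>
    have h1 : l ≠ [] := h l (by simp)
    have h2 : pyProduct ls ≠ [] := ih (fun x hx => h x (by simp [hx]))
    simp [pyProduct, List.flatMap_eq_nil_iff, List.map_eq_nil_iff, h2]
    exact List.exists_mem_of_ne_nil l h1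

lemma mkCodones_ne_nil (t : List Char)
    (h : ∀ c ∈ t, c ∈ ['A','C','G','T','R','Y','S','W','K','M','B','D','H','V','N']) :
    mkCodones t ≠ [] := by
  have hl : ∀ l ∈ t.map iupac, l ≠ [] := by
    intro l hl
    rcases List.mem_map.1 hl with ⟨c, hc, rfl⟩
    have := h c hc
    fin_cases this <;> decide
  intro hc
  rw [mkCodones, List.map_eq_nil_iff] at hc
  exact pyProduct_ne_nil _ hl hc

lemma map_joinSel (l : List (List PairCL)) :
    l.map joinSel = (l.map joinP).map (fun p => (String.ofList p.1, String.ofList p.2)) := by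
  simp [joinSel, joinP, List.map_map, Function.comp_def]

lemma pyRange3_nonneg (n : Int) : ∀ i ∈ PySem.List.pyRange 0 n 3, 0 ≤ i := by
  intro i hi
  have := (PySem.List.mem_pyRange_iff_of_pos (a := 0) (b := n) (s := 3) (by omega) i).1 hi
  omega

-- ===== VERDICT (by name: the statement is the Claim_ definition above) =====
theorem generar_variantes_dinamica_spec : Claim_equal_generar_variantes_dinamica := by
  intro secuencia lim _ hpre
  unfold Spec_generar_variantes_dinamica generar_variantes_dinamica generar_variantes_dinamica_alt
  dsimp only
  have hpre' : ∀ c ∈ secuencia.toList, c ∈ ['A','C','G','T','R','Y','S','W','K','M','B','D','H','V','N'] := by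
    intro c hc
    have := List.all_eq_true.1 hpre c hc
    simpa using this
  have hcodes : ∀ c ∈ secuencia.toList, c ∈ iupacCodes := by
    intro c hc
    have := hpre' c hc
    fin_cases this <;> decide
  -- B's per-triplet options coincide with A's
  have hmap : (PySem.List.pyRange 0 (secuencia.toList.length : Int) 3).map
        (fun i => opcionesDe (PySem.List.slice secuencia.toList (some i) (some (i + 3))))
      = (PySem.List.pyRange 0 (secuencia.toList.length : Int) 3).map
        (fun i => mkCodones (PySem.List.slice secuencia.toList (some i) (some (i + 3)))) := by
    apply List.map_congr_left
    intro i hi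
    have h0 : 0 ≤ i := pyRange3_nonneg _ i hi
    exact opciones_eq _
      (fun c hc => hcodes c (PySem.List.mem_of_mem_slice _ _ _ hc))
      (slice3_len _ _ h0)
  rw [hmap]
  have hopts : ∀ o ∈ (PySem.List.pyRange 0 (secuencia.toList.length : Int) 3).map
      (fun i => mkCodones (PySem.List.slice secuencia.toList (some i) (some (i + 3)))), o ≠ [] := by
    intro o hmem
    rcases List.mem_map.1 hmem with ⟨i, hi, rfl⟩
    apply mkCodones_ne_nil
    intro c hc
    exact hpre' c (PySem.List.mem_of_mem_slice _ _ _ hc)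
  rw [outerA_eq]
  rw [core_spec lim _ [([], [])] hopts (by simp)]
  have hone : ((([([], [])] : List PairCL).length : Nat) : Int) = 1 := by simp
  rw [hone]
  cases hf : findOverflow lim 1
      (((PySem.List.pyRange 0 (secuencia.toList.length : Int) 3).map
        (fun i => mkCodones (PySem.List.slice secuencia.toList (some i) (some (i + 3))))).map
        (fun o => (o.length : Int))) with
  | none =>
    dsimp only
    rw [map_joinSel, prodJoin]
  | some j =>
    dsimp only
    rw [map_joinSel]
    conv_rhs => rw [List.map_take, prodJoin]
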